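-- pv_equiv track=rewrite | github.com/SussyGuy35/open-susbot | lib/locareader.py | string_hash_to_newline
-- ===== SOURCE A (Python) =====
-- def string_hash_to_newline(_str):
--     _result = ""
--     _start = 0
--     i = 0
--     lc = None
--
--     while i < len(_str):
--         c = _str[i]
--         if c == "#":
--             if lc != "\\":
--                 _result += _str[_start:i] + "\n"
--             else:
--                 _result += _str[_start:i - 1] + "#"
--             _start = i + 1
--         lc = c
--         i += 1
--
--     return _result + _str[_start:i]
-- ===== SOURCE B (Python) =====
-- def string_hash_to_newline(_str):
--     segments = _str.split("#")
--     result = segments[0]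
--     for seg in segments[1:]:
--         if result.endswith("\\"):
--             result = result[:-1] + "#" + seg
--         else:
--             result += "\n" + seg
--     return result
-- ===== Notes on version B (the rewrite author's own statement) =====
-- stated objective: faster
-- what changed: A's per-character index scan with a look-behind variable and slice bookkeeping is replaced by one C-level split on the hash character followed by a fold over the segments, deciding escapes by whether the growing result ends in a backslash.
import Mathlib
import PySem

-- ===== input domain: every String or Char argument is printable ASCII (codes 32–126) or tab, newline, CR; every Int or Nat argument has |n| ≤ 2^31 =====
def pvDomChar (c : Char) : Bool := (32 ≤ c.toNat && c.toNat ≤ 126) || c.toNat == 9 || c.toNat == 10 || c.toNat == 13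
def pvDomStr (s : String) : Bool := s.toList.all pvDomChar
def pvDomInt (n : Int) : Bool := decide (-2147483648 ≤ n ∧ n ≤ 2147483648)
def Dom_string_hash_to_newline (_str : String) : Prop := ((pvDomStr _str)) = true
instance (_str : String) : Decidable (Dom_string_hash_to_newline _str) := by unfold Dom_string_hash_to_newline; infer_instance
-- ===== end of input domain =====

-- B replaces A's index scan with look-behind variable by a split-on-'#' then fold over the
-- segments, testing whether the growing result ends in a backslash (objective: faster, constant-factor).

-- ===== PORT A =====
-- _str[a:b] for 0 ≤ a ≤ b ≤ len, the only slices A takes (exact there)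
def pvSliceA (full : List Char) (a b : Nat) : List Char := (full.drop a).take (b - a)

-- the while-loop: recursion on the not-yet-scanned suffix, carrying i, _start, lc, _result
def aLoop (full : List Char) : List Char → Nat → Nat → Option Char → List Char → List Char
  | [], i, start, _, res => res ++ pvSliceA full start i
  | c :: rest, i, start, lc, res =>
    if c = '#' then
      if lc ≠ some '\\' then
        aLoop full rest (i + 1) (i + 1) (some c) (res ++ pvSliceA full start i ++ ['\n'])
      else
        aLoop full rest (i + 1) (i + 1) (some c) (res ++ pvSliceA full start (i - 1) ++ ['#'])
    else
      aLoop full rest (i + 1) start (some c) res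

def string_hash_to_newline (_str : String) : String :=
  String.mk (aLoop _str.toList _str.toList 0 0 none [])

-- ===== PORT B =====
-- _str.split("#") (Python semantics: ''.split('#') = [''])
def splitHash : List Char → List (List Char)
  | [] => [[]]
  | c :: rest =>
    if c = '#' then [] :: splitHash rest
    else
      match splitHash rest with
      | s :: ss => (c :: s) :: ss
      | [] => [[c]]   -- unreachable: splitHash never returns []

-- the for-loop over segments[1:], carrying result
def bLoop : List Char → List (List Char) → List Char
  | res, [] => res
  | res, seg :: rest =>
    if res.getLast? = some '\\' then bLoop (res.dropLast ++ '#' :: seg) rest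
    else bLoop (res ++ '\n' :: seg) rest

def string_hash_to_newline_alt (_str : String) : String :=
  match splitHash _str.toList with
  | s :: ss => String.mk (bLoop s ss)
  | [] => ""   -- unreachable

-- ===== PRECONDITION & SPEC =====
def Spec_string_hash_to_newline (_str : String) (out : String) : Prop := out = string_hash_to_newline_alt _str
instance (_str : String) (out : String) : Decidable (Spec_string_hash_to_newline _str out) := by unfold Spec_string_hash_to_newline; infer_instance

-- ===== CLAIM (what is proved, stated in full; the proofs are below) =====
def Claim_equal_string_hash_to_newline : Prop := ∀ (_str : String), Dom_string_hash_to_newline _str → Spec_string_hash_to_newline _str (string_hash_to_newline _str)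

-- ===== LEMMAS AND PROOFS =====

-- common reference: process `rest` with pending (not-yet-emitted) prefix `pend`
def hRef : List Char → List Char → List Char
  | pend, [] => pend
  | pend, c :: rest =>
    if c = '#' then
      if pend.getLast? = some '\\' then pend.dropLast ++ '#' :: hRef [] rest
      else pend ++ '\n' :: hRef [] rest
    else hRef (pend ++ [c]) rest

-- join segments back with leading '#'s
def joinHash : List (List Char) → List Char
  | [] => []
  | s :: ss => '#' :: (s ++ joinHash ss)

lemma hRef_hash (pend t : List Char) :
    hRef pend ('#' :: t) =
      if pend.getLast? = some '\\' then pend.dropLast ++ '#' :: hRef [] t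
      else pend ++ '\n' :: hRef [] t := by
  simp [hRef]

lemma hRef_absorb (s : List Char) : ∀ (pend t : List Char), '#' ∉ s →
    hRef pend (s ++ t) = hRef (pend ++ s) t := by
  induction s with
  | nil => intro pend t _; simp
  | cons c s ih =>
    intro pend t hfree
    simp only [List.cons_append, hRef]
    rw [if_neg (by simp at hfree; exact fun h => hfree.1 h.symm)]
    rw [ih _ _ (by simp at hfree; exact hfree.2)]
    simp

lemma aLoop_eq (full : List Char) : ∀ (rest pend : List Char) (start : Nat)
    (lc : Option Char) (res : List Char),
    full.drop start = pend ++ rest →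
    ((lc = some '\\') ↔ (pend.getLast? = some '\\')) →
    aLoop full rest (start + pend.length) start lc res = res ++ hRef pend rest := by
  intro rest
  induction rest with
  | nil =>
    intro pend start lc res hdrop _
    simp only [aLoop, hRef, pvSliceA]
    rw [hdrop]
    simp
  | cons c rest ih =>
    intro pend start lc res hdrop hlc
    by_cases hc : c = '#'
    · subst hc
      have hslice : pvSliceA full start (start + pend.length) = pend := by
        simp [pvSliceA, hdrop]
      have hdrop' : full.drop (start + pend.length + 1) = [] ++ rest := by
        have h := congrArg (List.drop (pend.length + 1)) hdrop
        rw [List.drop_drop,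
            show pend ++ '#' :: rest = (pend ++ ['#']) ++ rest by simp,
            show pend.length + 1 = (pend ++ ['#']).length by simp,
            List.drop_left] at h
        simpa [Nat.add_assoc] using h
      by_cases hl : lc = some '\\'
      · -- escaped '#'
        have hpl : pend.getLast? = some '\\' := hlc.mp hl
        have hpne : pend ≠ [] := by intro h; rw [h] at hpl; simp at hpl
        have hslice' : pvSliceA full start (start + pend.length - 1) = pend.dropLast := by
          have hlen : 1 ≤ pend.length := List.length_pos_iff.mpr hpne
          simp only [pvSliceA, hdrop]
          rw [show start + pend.length - 1 - start = pend.length - 1 by omega]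
          rw [List.take_append_of_le_length (by omega), List.dropLast_eq_take]
        simp only [aLoop]
        rw [if_pos trivial, if_neg (not_not_intro hl)]
        have hrec := ih [] (start + pend.length + 1) (some '#')
          (res ++ pvSliceA full start (start + pend.length - 1) ++ ['#']) hdrop' (by simp)
        simp only [List.length_nil, Nat.add_zero] at hrec
        rw [hrec, hslice', hRef_hash, if_pos hpl]
        simp
      · -- unescaped '#'
        have hpl : pend.getLast? ≠ some '\\' := fun h => hl (hlc.mpr h)
        simp only [aLoop]
        rw [if_pos trivial, if_pos hl]
        have hrec := ih [] (start + pend.length + 1) (some '#')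
          (res ++ pvSliceA full start (start + pend.length) ++ ['\n']) hdrop' (by simp)
        simp only [List.length_nil, Nat.add_zero] at hrec
        rw [hrec, hslice, hRef_hash, if_neg hpl]
        simp
    · -- ordinary character
      have hdrop' : full.drop start = (pend ++ [c]) ++ rest := by
        rw [hdrop]; simp
      simp only [aLoop, if_neg hc]
      have hrec := ih (pend ++ [c]) start (some c) res hdrop' (by simp)
      have harith : start + pend.length + 1 = start + (pend ++ [c]).length := by
        simp [Nat.add_assoc]
      rw [harith, hrec]
      simp [hRef, hc]

lemma splitHash_ne_nil (l : List Char) : splitHash l ≠ [] := by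
  cases l with
  | nil => simp [splitHash]
  | cons c rest =>
    simp only [splitHash]
    split
    · simp
    · split
      · simp
      · simp

lemma splitHash_free : ∀ (l : List Char), ∀ s ∈ splitHash l, '#' ∉ s := by
  intro l
  induction l with
  | nil => simp [splitHash]
  | cons c rest ih =>
    by_cases hc : c = '#'
    · simp only [splitHash, if_pos hc]
      intro s hs
      rcases List.mem_cons.mp hs with h | h
      · subst h; simp
      · exact ih s h
    · simp only [splitHash, if_neg hc]
      rcases hsp : splitHash rest with _ | ⟨t, ts⟩
      · exact absurd hsp (splitHash_ne_nil rest)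
      intro s hs
      rcases List.mem_cons.mp hs with h | h
      · subst h
        intro hmem
        rcases List.mem_cons.mp hmem with h' | h'
        · exact hc h'.symm
        · exact ih t (by rw [hsp]; exact List.mem_cons_self ..) h'
      · exact ih s (by rw [hsp]; exact List.mem_cons_of_mem _ h)

lemma splitHash_join : ∀ (l : List Char), ∀ s ss, splitHash l = s :: ss → l = s ++ joinHash ss := by
  intro l
  induction l with
  | nil =>
    intro s ss h
    simp only [splitHash] at h
    injection h with h1 h2
    rw [← h1, ← h2]
    simp [joinHash]
  | cons c rest ih =>
    intro s ss h
    by_cases hc : c = '#'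
    · rw [splitHash, if_pos hc] at h
      injection h with h1 h2
      rcases hsp : splitHash rest with _ | ⟨t, ts⟩
      · exact absurd hsp (splitHash_ne_nil rest)
      rw [← h1, ← h2, hsp, joinHash, ← ih t ts hsp, hc]
      simp
    · rcases hsp : splitHash rest with _ | ⟨t, ts⟩
      · exact absurd hsp (splitHash_ne_nil rest)
      rw [splitHash, if_neg hc, hsp] at h
      injection h with h1 h2
      rw [← h1, ← h2]
      simp [joinHash, ih t ts hsp]

lemma bLoop_eq : ∀ (ss : List (List Char)) (acc pend : List Char),
    (∀ s ∈ ss, '#' ∉ s) →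
    acc.getLast? ≠ some '\\' →
    bLoop (acc ++ pend) ss = acc ++ hRef pend (joinHash ss) := by
  intro ss
  induction ss with
  | nil => intro acc pend _ _; simp [bLoop, joinHash, hRef]
  | cons seg ss ih =>
    intro acc pend hfree hacc
    have hsegfree : '#' ∉ seg := hfree seg (by simp)
    have hssfree : ∀ s ∈ ss, '#' ∉ s := fun s hs => hfree s (by simp [hs])
    simp only [joinHash]
    rw [hRef_hash]
    by_cases hp : pend.getLast? = some '\\'
    · have hpne : pend ≠ [] := by intro h; rw [h] at hp; simp at hp
      have hres : (acc ++ pend).getLast? = some '\\' := by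
        rw [List.getLast?_append_of_ne_nil _ hpne]; exact hp
      rw [if_pos hp]
      simp only [bLoop]
      rw [if_pos hres, List.dropLast_append_of_ne_nil hpne,
          show acc ++ pend.dropLast ++ '#' :: seg = (acc ++ pend.dropLast ++ ['#']) ++ seg by simp,
          ih (acc ++ pend.dropLast ++ ['#']) seg hssfree (by simp),
          hRef_absorb seg [] (joinHash ss) hsegfree]
      simp
    · have hres : (acc ++ pend).getLast? ≠ some '\\' := by
        rcases List.eq_nil_or_concat pend with h | ⟨p', a, h⟩
        · subst h; simpa using hacc
        · subst h
          rw [List.getLast?_append_of_ne_nil _ (by simp)]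
          simpa using hp
      rw [if_neg hp]
      simp only [bLoop]
      rw [if_neg hres,
          show acc ++ pend ++ '\n' :: seg = (acc ++ pend ++ ['\n']) ++ seg by simp,
          ih (acc ++ pend ++ ['\n']) seg hssfree (by simp),
          hRef_absorb seg [] (joinHash ss) hsegfree]
      simp

lemma alt_eq_hRef (_str : String) :
    string_hash_to_newline_alt _str = String.mk (hRef [] _str.toList) := by
  unfold string_hash_to_newline_alt
  rcases hsp : splitHash _str.toList with _ | ⟨s, ss⟩
  · exact absurd hsp (splitHash_ne_nil _)
  · show String.mk (bLoop s ss) = String.mk (hRef [] _str.toList)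
    have hjoin := splitHash_join _str.toList s ss hsp
    have hfree := splitHash_free _str.toList
    rw [hsp] at hfree
    have hsfree : '#' ∉ s := hfree s (by simp)
    have hb := bLoop_eq ss [] s (fun t ht => hfree t (by simp [ht])) (by simp)
    simp only [List.nil_append] at hb
    rw [hb, hjoin, hRef_absorb s [] (joinHash ss) hsfree]
    simp

lemma a_eq_hRef (_str : String) :
    string_hash_to_newline _str = String.mk (hRef [] _str.toList) := by
  unfold string_hash_to_newline
  exact congrArg String.mk
    (by simpa using aLoop_eq _str.toList _str.toList [] 0 none [] (by simp) (by simp))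

-- ===== VERDICT (by name: the statement is the Claim_ definition above) =====
theorem string_hash_to_newline_spec : Claim_equal_string_hash_to_newline := by
  intro _str _
  unfold Spec_string_hash_to_newline
  rw [a_eq_hRef, alt_eq_hRef]
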